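-- pv_equiv track=rewrite | github.com/DivyaRaj1602/GigBridge | app.py | human_readable_expected_list
-- ===== SOURCE A (Python) =====
-- def human_readable_expected_list(expected_features: list) -> list:
--     """
--     Collapse expected one-hot / num__ names to human-friendly canonical column names,
--     preserving order and deduplicating.
--     """
--     human_readable = []
--     seen = set()
--     for feat in expected_features:
--         name = feat
--         if feat.startswith("cat__"):
--             try:
--                 rest = feat.split("cat__", 1)[1]
--                 col = rest.split("_", 1)[0]
--                 name = col
--             except Exception:
--                 name = feat
--         elif feat.startswith("num__"):
--             name = feat.split("num__", 1)[1]
--         else: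
--             if "__" in feat:
--                 name = feat.split("__")[-1]
--             elif "_" in feat:
--                 name = feat.split("_")[0]
--             else:
--                 name = feat
--
--         name = str(name)
--         if name not in seen:
--             human_readable.append(name)
--             seen.add(name)
--
--     canonical_order = [
--         "LoanID", "Age", "Income", "LoanAmount", "RequestedLoanAmount",
--         "CreditScore", "MonthsEmployed", "NumCreditLines",
--         "InterestRate", "LoanTerm", "DTIRatio",
--         "Education", "EmploymentType", "MaritalStatus",
--         "HasMortgage", "HasDependents", "LoanPurpose", "HasCoSigner", "Default"
--     ]
--
--     final_expected = []
--     for col in canonical_order: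
--         if col in human_readable and col not in final_expected:
--             final_expected.append(col)
--     for col in human_readable:
--         if col not in final_expected:
--             final_expected.append(col)
--
--     return final_expected
-- ===== SOURCE B (Python) =====
-- _CANONICAL_ORDER = [
--     "LoanID", "Age", "Income", "LoanAmount", "RequestedLoanAmount",
--     "CreditScore", "MonthsEmployed", "NumCreditLines",
--     "InterestRate", "LoanTerm", "DTIRatio",
--     "Education", "EmploymentType", "MaritalStatus",
--     "HasMortgage", "HasDependents", "LoanPurpose", "HasCoSigner", "Default"
-- ]
-- _RANK = {c: i for i, c in enumerate(_CANONICAL_ORDER)}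
--
--
-- def _canonical_name(feat):
--     if feat.startswith("cat__"):
--         return feat.split("cat__", 1)[1].split("_", 1)[0]
--     if feat.startswith("num__"):
--         return feat.split("num__", 1)[1]
--     if "__" in feat:
--         return feat.split("__")[-1]
--     if "_" in feat:
--         return feat.split("_")[0]
--     return feat
--
--
-- def human_readable_expected_list(expected_features: list) -> list:
--     names = list(dict.fromkeys(_canonical_name(f) for f in expected_features))
--     known = sorted((n for n in names if n in _RANK), key=_RANK.__getitem__)
--     unknown = [n for n in names if n not in _RANK]
--     return known + unknown
-- ===== Notes on version B (the rewrite author's own statement) =====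
-- stated objective: faster
-- what changed: The two repeated-scan reordering loops (scan the canonical list with 'col in human_readable' and then re-scan for leftovers, each with linear membership tests on the growing result) are replaced by a precomputed rank dictionary and a single stable sort by rank, with non-canonical names keeping their original order behind the canonical ones.
import Mathlib
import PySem

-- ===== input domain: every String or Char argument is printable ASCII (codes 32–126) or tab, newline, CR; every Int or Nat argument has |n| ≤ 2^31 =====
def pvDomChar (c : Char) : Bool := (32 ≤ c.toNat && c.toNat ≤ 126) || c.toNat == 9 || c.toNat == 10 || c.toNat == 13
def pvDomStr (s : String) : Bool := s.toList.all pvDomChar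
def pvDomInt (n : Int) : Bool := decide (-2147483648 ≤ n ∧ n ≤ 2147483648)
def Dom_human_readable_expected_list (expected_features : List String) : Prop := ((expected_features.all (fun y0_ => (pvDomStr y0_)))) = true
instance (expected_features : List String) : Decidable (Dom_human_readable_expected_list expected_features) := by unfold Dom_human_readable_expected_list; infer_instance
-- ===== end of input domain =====

-- B replaces A's two repeated-scan reordering loops by a rank dictionary and one stable sort; return value only, no mutation.

-- ===== PORT A =====
-- per-feature canonicalization step of A's first loop (the name computation plus the seen-set dedup)
def pvStepA (st : List String × PySem.Set String) (feat : String) : List String × PySem.Set String :=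
  let name : String :=
    if PySem.Str.startswith feat "cat__" then
      -- try: rest = feat.split("cat__",1)[1]; col = rest.split("_",1)[0]; except: name = feat
      match (PySem.Str.splitMax? feat "cat__" 1).bind (fun ps => PySem.List.pyGet? ps 1) with
      | none => feat
      | some rest =>
        match (PySem.Str.splitMax? rest "_" 1).bind (fun ps => PySem.List.pyGet? ps 0) with
        | none => feat
        | some col => col
    else if PySem.Str.startswith feat "num__" then
      -- index 1 always exists (feat starts with "num__"), so the default is unreachable
      PySem.List.pyGetD ((PySem.Str.splitMax? feat "num__" 1).getD []) 1 feat
    else if PySem.Str.isIn "__" feat then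
      -- split on a non-empty separator is never none and never empty: defaults unreachable
      PySem.List.pyGetD ((PySem.Str.split? feat "__").getD []) (-1) feat
    else if PySem.Str.isIn "_" feat then
      PySem.List.pyGetD ((PySem.Str.split? feat "_").getD []) 0 feat
    else feat
  -- name = str(name) is the identity on a str
  if PySem.Set.contains st.2 name = false then (st.1 ++ [name], PySem.Set.add st.2 name) else st

def human_readable_expected_list (expected_features : List String) : List String :=
  let p := expected_features.foldl pvStepA ([], PySem.Set.empty)
  let human_readable := p.1
  let canonical_order : List String :=
    ["LoanID", "Age", "Income", "LoanAmount", "RequestedLoanAmount",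
     "CreditScore", "MonthsEmployed", "NumCreditLines",
     "InterestRate", "LoanTerm", "DTIRatio",
     "Education", "EmploymentType", "MaritalStatus",
     "HasMortgage", "HasDependents", "LoanPurpose", "HasCoSigner", "Default"]
  let final1 := canonical_order.foldl
    (fun acc col => if col ∈ human_readable ∧ col ∉ acc then acc ++ [col] else acc) []
  human_readable.foldl (fun acc col => if col ∉ acc then acc ++ [col] else acc) final1

-- ===== PORT B =====
def pvCanonicalOrder : List String :=
  ["LoanID", "Age", "Income", "LoanAmount", "RequestedLoanAmount",
   "CreditScore", "MonthsEmployed", "NumCreditLines",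
   "InterestRate", "LoanTerm", "DTIRatio",
   "Education", "EmploymentType", "MaritalStatus",
   "HasMortgage", "HasDependents", "LoanPurpose", "HasCoSigner", "Default"]

-- _RANK = {c: i for i, c in enumerate(_CANONICAL_ORDER)}
def pvRank : PySem.Dict String Int :=
  (PySem.List.enumerate pvCanonicalOrder 0).foldl (fun d p => d.insert p.2 p.1) PySem.Dict.empty

-- _canonical_name(feat)
def canonicalName (feat : String) : String :=
  if PySem.Str.startswith feat "cat__" then
    match (PySem.Str.splitMax? feat "cat__" 1).bind (fun ps => PySem.List.pyGet? ps 1) with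
    | none => feat
    | some rest =>
      match (PySem.Str.splitMax? rest "_" 1).bind (fun ps => PySem.List.pyGet? ps 0) with
      | none => feat
      | some col => col
  else if PySem.Str.startswith feat "num__" then
    PySem.List.pyGetD ((PySem.Str.splitMax? feat "num__" 1).getD []) 1 feat
  else if PySem.Str.isIn "__" feat then
    PySem.List.pyGetD ((PySem.Str.split? feat "__").getD []) (-1) feat
  else if PySem.Str.isIn "_" feat then
    PySem.List.pyGetD ((PySem.Str.split? feat "_").getD []) 0 feat
  else feat

def human_readable_expected_list_alt (expected_features : List String) : List String :=
  let names := PySem.List.dedup (expected_features.map canonicalName)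
  let known := PySem.List.sorted (names.filter (fun n => pvRank.contains n))
    (fun n => pvRank.getD n 0) false
  let unknown := names.filter (fun n => !(pvRank.contains n))
  known ++ unknown

-- ===== PRECONDITION & SPEC =====
def Spec_human_readable_expected_list (expected_features : List String) (out : List String) : Prop := out = human_readable_expected_list_alt expected_features
instance (expected_features : List String) (out : List String) : Decidable (Spec_human_readable_expected_list expected_features out) := by unfold Spec_human_readable_expected_list; infer_instance

-- ===== CLAIM (what is proved, stated in full; the proofs are below) =====
def Claim_equal_human_readable_expected_list : Prop := ∀ (expected_features : List String), Dom_human_readable_expected_list expected_features → Spec_human_readable_expected_list expected_features (human_readable_expected_list expected_features)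

-- ===== LEMMAS AND PROOFS =====

theorem pvStepA_eq (st : List String × PySem.Set String) (feat : String) :
    pvStepA st feat =
      (if PySem.Set.contains st.2 (canonicalName feat) = false
       then (st.1 ++ [canonicalName feat], PySem.Set.add st.2 (canonicalName feat)) else st) := rfl

theorem pv_phase1 (feats : List String) : ∀ (s : List String),
    feats.foldl pvStepA (s, s)
      = ((feats.map canonicalName).foldl PySem.Set.add s,
         (feats.map canonicalName).foldl PySem.Set.add s) := by
  induction feats with
  | nil => intro s; rfl
  | cons f fs ih =>
    intro s
    have hstep : pvStepA (s, s) f = (PySem.Set.add s (canonicalName f), PySem.Set.add s (canonicalName f)) := by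
      rw [pvStepA_eq]
      by_cases h : PySem.Set.contains s (canonicalName f) = false
      · rw [if_pos h]
        have : PySem.Set.add s (canonicalName f) = s ++ [canonicalName f] := by
          simp [PySem.Set.add]
          exact by simpa using h
        rw [this]
      · rw [if_neg h]
        have h' : PySem.Set.contains s (canonicalName f) = true := by
          simpa using h
        have : PySem.Set.add s (canonicalName f) = s := by
          simp [PySem.Set.add]
          exact by simpa using h'
        rw [this]
    simp only [List.foldl_cons, List.map_cons, hstep, ih]

theorem pv_loop1 (l : List String) : ∀ (c acc : List String), c.Nodup → (∀ x ∈ c, x ∉ acc) →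
    c.foldl (fun acc col => if col ∈ l ∧ col ∉ acc then acc ++ [col] else acc) acc
      = acc ++ c.filter (fun col => decide (col ∈ l)) := by
  intro c
  induction c with
  | nil => intro acc _ _; simp
  | cons col rest ih =>
    intro acc hnd hni
    have hcol : col ∉ acc := hni col (by simp)
    rcases List.nodup_cons.mp hnd with ⟨hcr, hndr⟩
    by_cases hm : col ∈ l
    · have : (if col ∈ l ∧ col ∉ acc then acc ++ [col] else acc) = acc ++ [col] :=
        if_pos ⟨hm, hcol⟩
      simp only [List.foldl_cons, this]
      rw [ih (acc ++ [col]) hndr (by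
        intro x hx
        simp only [List.mem_append, List.mem_singleton]
        rintro (h | rfl)
        · exact hni x (by simp [hx]) h
        · exact hcr hx)]
      simp [hm]
    · have : (if col ∈ l ∧ col ∉ acc then acc ++ [col] else acc) = acc := by
        simp [hm]
      simp only [List.foldl_cons, this]
      rw [ih acc hndr (fun x hx => hni x (by simp [hx]))]
      simp [hm]

theorem pv_loop2 (cset : List String) : ∀ (l2 acc : List String), l2.Nodup →
    (∀ x ∈ l2, (x ∈ acc ↔ x ∈ cset)) →
    l2.foldl (fun acc col => if col ∉ acc then acc ++ [col] else acc) acc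
      = acc ++ l2.filter (fun col => decide (col ∉ cset)) := by
  intro l2
  induction l2 with
  | nil => intro acc _ _; simp
  | cons col rest ih =>
    intro acc hnd hinv
    rcases List.nodup_cons.mp hnd with ⟨hcr, hndr⟩
    have hiff := hinv col (by simp)
    by_cases hc : col ∈ cset
    · have hin : col ∈ acc := hiff.mpr hc
      have : (if col ∉ acc then acc ++ [col] else acc) = acc := by simp [hin]
      simp only [List.foldl_cons, this]
      rw [ih acc hndr (fun x hx => hinv x (by simp [hx]))]
      simp [hc]
    · have hnin : col ∉ acc := fun h => hc (hiff.mp h)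
      have : (if col ∉ acc then acc ++ [col] else acc) = acc ++ [col] := if_pos hnin
      simp only [List.foldl_cons, this]
      rw [ih (acc ++ [col]) hndr (by
        intro x hx
        have hxne : x ≠ col := fun h => hcr (h ▸ hx)
        simp only [List.mem_append, List.mem_singleton]
        constructor
        · rintro (h | rfl)
          · exact (hinv x (by simp [hx])).mp h
          · exact absurd rfl hxne
        · intro h
          exact Or.inl ((hinv x (by simp [hx])).mpr h))]
      simp [hc]

theorem pvRank_keys : pvRank.keys = pvCanonicalOrder := by decide

theorem pvRank_contains (x : String) :
    pvRank.contains x = decide (x ∈ pvCanonicalOrder) := by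
  rw [PySem.Dict.contains_eq_decide_mem_keys, pvRank_keys]

theorem pvCanonicalOrder_nodup : pvCanonicalOrder.Nodup := by decide

theorem pvRank_pairwise :
    pvCanonicalOrder.Pairwise (fun a b => pvRank.getD a 0 < pvRank.getD b 0) := by decide

theorem pv_sorted_known (names : List String) (hnd : names.Nodup) :
    PySem.List.sorted (names.filter (fun n => pvRank.contains n))
      (fun n => pvRank.getD n 0) false
    = pvCanonicalOrder.filter (fun col => decide (col ∈ names)) := by
  apply PySem.List.sorted_eq_of_perm_of_pairwise_lt
  · rw [List.perm_ext_iff_of_nodup (pvCanonicalOrder_nodup.filter _) (hnd.filter _)]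
    intro a
    simp [List.mem_filter, pvRank_contains, and_comm]
  · exact pvRank_pairwise.filter _


theorem pvA_eq (feats : List String) :
    human_readable_expected_list feats
      = pvCanonicalOrder.filter (fun col => decide (col ∈ PySem.List.dedup (feats.map canonicalName)))
        ++ (PySem.List.dedup (feats.map canonicalName)).filter (fun col => decide (col ∉ pvCanonicalOrder)) := by
  have hnames : (feats.foldl pvStepA ([], PySem.Set.empty)).1
      = PySem.List.dedup (feats.map canonicalName) := by
    rw [show (([], PySem.Set.empty) : List String × PySem.Set String)
          = (([] : List String), ([] : List String)) from rfl, pv_phase1]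
    rw [PySem.List.dedup_eq_ofList, PySem.Set.ofList_eq_foldl]
  have hC : (["LoanID", "Age", "Income", "LoanAmount", "RequestedLoanAmount",
     "CreditScore", "MonthsEmployed", "NumCreditLines",
     "InterestRate", "LoanTerm", "DTIRatio",
     "Education", "EmploymentType", "MaritalStatus",
     "HasMortgage", "HasDependents", "LoanPurpose", "HasCoSigner", "Default"] : List String)
      = pvCanonicalOrder := rfl
  simp only [human_readable_expected_list, hnames]
  rw [hC]
  rw [pv_loop1 _ pvCanonicalOrder [] pvCanonicalOrder_nodup (by simp)]
  rw [pv_loop2 pvCanonicalOrder _ _ (PySem.List.nodup_dedup _)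
      (by
        intro x hx
        simp only [List.nil_append, List.mem_filter]
        exact ⟨fun h => h.1, fun h => ⟨h, decide_eq_true hx⟩⟩)]
  simp

theorem pvB_eq (feats : List String) :
    human_readable_expected_list_alt feats
      = pvCanonicalOrder.filter (fun col => decide (col ∈ PySem.List.dedup (feats.map canonicalName)))
        ++ (PySem.List.dedup (feats.map canonicalName)).filter (fun col => decide (col ∉ pvCanonicalOrder)) := by
  simp only [human_readable_expected_list_alt]
  rw [pv_sorted_known _ (PySem.List.nodup_dedup _)]
  congr 1
  apply List.filter_congr
  intro x _
  simp [pvRank_contains]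

-- ===== VERDICT (by name: the statement is the Claim_ definition above) =====
theorem human_readable_expected_list_spec : Claim_equal_human_readable_expected_list := by
  intro feats _hDom
  unfold Spec_human_readable_expected_list
  rw [pvA_eq, pvB_eq]
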